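-- pv_equiv track=rewrite | github.com/05kartikgarg/DS-Algo-placement-question-python | graphs/Diameter of a Tree.py | dfs1
-- ===== SOURCE A (Python) =====
-- def dfs1(graph,node,visited):
--     visited[node]=True
--     sm=0
--     temp=node
--     for child in graph[node]:
--         if not visited[child]:
--             (tval,tnode)=dfs1(graph,child,visited)
--             if tval>sm:
--                 temp=tnode
--                 sm=tval
--     return [sm+1,temp]
-- ===== SOURCE B (Python) =====
-- def dfs1(graph, node, visited):
--     # Explicit-stack post-order traversal instead of recursion; mutates visited like the original.
--     visited[node] = True
--     stack = [(graph[node], 0, node)]   # frame = (children still to scan, sm, temp)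
--     ret = None
--     while stack:
--         rest, sm, temp = stack.pop()
--         if ret is not None:
--             tval, tnode = ret
--             ret = None
--             if tval > sm:
--                 sm, temp = tval, tnode
--         while rest and visited[rest[0]]:
--             rest = rest[1:]
--         if rest:
--             child = rest[0]
--             stack.append((rest[1:], sm, temp))
--             visited[child] = True
--             stack.append((graph[child], 0, child))
--         else:
--             ret = (sm + 1, temp)
--     return [ret[0], ret[1]]
-- ===== Notes on version B (the rewrite author's own statement) =====
-- stated objective: alternative
-- what changed: The recursive DFS is replaced by an iterative engine with an explicit stack of frames (remaining children, best distance, best node) that threads the visited dict and propagates each finished subtree's result through a return register, preserving child order and the strict-> tie-break.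
import Mathlib
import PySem

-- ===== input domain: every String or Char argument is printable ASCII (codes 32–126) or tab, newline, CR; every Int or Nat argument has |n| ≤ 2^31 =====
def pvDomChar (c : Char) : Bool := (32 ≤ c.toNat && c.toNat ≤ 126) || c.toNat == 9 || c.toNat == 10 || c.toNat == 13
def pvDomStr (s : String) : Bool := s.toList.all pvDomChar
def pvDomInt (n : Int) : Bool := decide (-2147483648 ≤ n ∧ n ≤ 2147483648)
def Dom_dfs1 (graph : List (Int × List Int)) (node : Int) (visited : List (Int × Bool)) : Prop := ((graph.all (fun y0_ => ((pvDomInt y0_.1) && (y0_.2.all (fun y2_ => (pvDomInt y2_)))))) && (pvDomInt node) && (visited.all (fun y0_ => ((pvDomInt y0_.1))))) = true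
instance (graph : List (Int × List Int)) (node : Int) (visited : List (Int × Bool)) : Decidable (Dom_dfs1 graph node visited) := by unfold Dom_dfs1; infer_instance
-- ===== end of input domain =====

-- B replaces the recursive DFS by an explicit-stack iterative engine (same child order, same
-- strict-> tie-break, same in-place marking of `visited`); equivalence is about the return value
-- (both programs mutate `visited` identically).  Both ports thread the visited dict explicitly and
-- use fuel `(total number of adjacency-list entries) + 1`, a bound on possible DFS entries, purely
-- as a totality guard (never exhausted on inputs where the Python returns).

-- Shared exact models of Python dict primitives on the assoc list (first-match lookup,
-- overwrite-in-place-else-append assignment), exact for Python dicts.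
def dget? {α : Type} : List (Int × α) → Int → Option α
  | [], _ => none
  | (k, a) :: r, x => if k = x then some a else dget? r x

-- visited[x] = True
def dsetTrue : List (Int × Bool) → Int → List (Int × Bool)
  | [], x => [(x, true)]
  | (k, b) :: r, x => if k = x then (k, true) :: r else (k, b) :: dsetTrue r x

-- graph[n]  (default [] never observed under Pre_, where the key is present when read)
def dgetL (graph : List (Int × List Int)) (n : Int) : List Int := (dget? graph n).getD []

-- visited[c]  (default false never observed under Pre_)
def vis (v : List (Int × Bool)) (c : Int) : Bool := (dget? v c).getD false

-- ===== PORT A =====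
mutual
-- literal port of A's recursion; fuel only guards termination
def dfsA (graph : List (Int × List Int)) : Nat → Int → List (Int × Bool) → (Int × Int) × List (Int × Bool)
  | 0, node, visited => ((1, node), visited)
  | Nat.succ f, node, visited =>
      let v1 := dsetTrue visited node
      let r := loopA graph f (dgetL graph node) 0 node v1
      ((r.1 + 1, r.2.1), r.2.2)
termination_by f node visited => ((f : Nat), 0)

-- A's `for child in graph[node]` loop with state (sm, temp, visited)
def loopA (graph : List (Int × List Int)) (f : Nat) : List Int → Int → Int → List (Int × Bool) → Int × Int × List (Int × Bool)
  | [], sm, temp, visited => (sm, temp, visited)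
  | c :: cs, sm, temp, visited =>
      if vis visited c then loopA graph f cs sm temp visited
      else
        let t := dfsA graph f c visited
        loopA graph f cs (if t.1.1 > sm then t.1.1 else sm) (if t.1.1 > sm then t.1.2 else temp) t.2
termination_by rest sm temp visited => (f, rest.length + 1)
end

def dfs1 (graph : List (Int × List Int)) (node : Int) (visited : List (Int × Bool)) : List Int :=
  let r := dfsA graph ((graph.flatMap (fun p => p.2)).length + 1) node visited
  [r.1.1, r.1.2]

-- ===== PORT B =====
-- `while rest and visited[rest[0]]: rest = rest[1:]`
def skipB (v : List (Int × Bool)) : List Int → List Int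
  | [] => []
  | c :: cs => if vis v c then skipB v cs else c :: cs

-- the machine loop of Source B: stack of frames (rest, sm, temp), return register, visited
def runB (graph : List (Int × List Int)) : Nat → List (List Int × Int × Int) → Option (Int × Int) → List (Int × Bool) → Option (Int × Int) × List (Int × Bool)
  | _, [], ret, v => (ret, v)
  | fuel, (rest, sm, temp) :: stack, some (tval, tnode), v =>
      runB graph fuel ((rest, if tval > sm then tval else sm, if tval > sm then tnode else temp) :: stack) none v
  | fuel, (rest, sm, temp) :: stack, none, v =>
      match skipB v rest with
      | [] => runB graph fuel stack (some (sm + 1, temp)) v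
      | child :: rest' =>
          match fuel with
          | 0 => (none, v)
          | Nat.succ f =>
              runB graph f ((dgetL graph child, 0, child) :: (rest', sm, temp) :: stack) none (dsetTrue v child)
termination_by fuel stack ret v => (fuel, 2 * stack.length + if ret.isSome then 1 else 0)

def dfs1_alt (graph : List (Int × List Int)) (node : Int) (visited : List (Int × Bool)) : List Int :=
  let r := runB graph ((graph.flatMap (fun p => p.2)).length + 1)
    [(dgetL graph node, 0, node)] none (dsetTrue visited node)
  match r.1 with
  | some (a, b) => [a, b]
  | none => []

-- ===== PRECONDITION & SPEC =====
-- the ids the traversal enters: the least set containing `node` and closed under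
-- "child of an entered node whose initial visited entry is not True"
def rgrow (graph : List (Int × List Int)) (visited : List (Int × Bool)) : Nat → List Int → List Int
  | 0, acc => acc
  | n + 1, acc =>
      rgrow graph visited n
        (acc ++ ((graph.filter (fun p => decide (p.1 ∈ acc))).flatMap (fun p => p.2)).filter
            (fun c => !vis visited c && decide (c ∉ acc)))

def entered (graph : List (Int × List Int)) (node : Int) (visited : List (Int × Bool)) : List Int :=
  rgrow graph visited ((graph.flatMap (fun p => p.2)).length + 1) [node]

-- Pre_ is exactly the no-KeyError domain: the start node is a graph key, every entered id is a
-- graph key, and every child of an entered id is a visited key (or the start node, which is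
-- marked visited first).
def Pre_dfs1 (graph : List (Int × List Int)) (node : Int) (visited : List (Int × Bool)) : Prop :=
  (dget? graph node).isSome = true ∧
  ∀ x ∈ entered graph node visited,
    (dget? graph x).isSome = true ∧
    ∀ c ∈ dgetL graph x, ((dget? visited c).isSome = true ∨ c = node)
instance (graph : List (Int × List Int)) (node : Int) (visited : List (Int × Bool)) : Decidable (Pre_dfs1 graph node visited) := by unfold Pre_dfs1; infer_instance

def pvWitness_dfs1 : (List (Int × List Int)) × Int × (List (Int × Bool)) :=
  ([(0, [1, 2]), (1, [2]), (2, [])], 0, [(0, false), (1, false), (2, false)])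

def Spec_dfs1 (graph : List (Int × List Int)) (node : Int) (visited : List (Int × Bool)) (out : List Int) : Prop := out = dfs1_alt graph node visited
instance (graph : List (Int × List Int)) (node : Int) (visited : List (Int × Bool)) (out : List Int) : Decidable (Spec_dfs1 graph node visited out) := by unfold Spec_dfs1; infer_instance

-- ===== CLAIM (what is proved, stated in full; the proofs are below) =====
def Claim_equal_dfs1 : Prop := ∀ (graph : List (Int × List Int)) (node : Int) (visited : List (Int × Bool)), Dom_dfs1 graph node visited → Pre_dfs1 graph node visited → Spec_dfs1 graph node visited (dfs1 graph node visited)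

-- ===== LEMMAS AND PROOFS =====

-- fuel measure: distinct adjacency-list ids whose current visited entry is not True
def uN (graph : List (Int × List Int)) : List Int := (graph.flatMap (fun p => p.2)).dedup

def nv (graph : List (Int × List Int)) (v : List (Int × Bool)) : Nat :=
  ((uN graph).filter (fun c => !vis v c)).length

theorem dget?_dsetTrue (v : List (Int × Bool)) (x c : Int) :
    dget? (dsetTrue v x) c = if c = x then some true else dget? v c := by
  induction v with
  | nil =>
    by_cases h : c = x
    · subst h; simp [dsetTrue, dget?]
    · have hxc : ¬ x = c := fun hh => h hh.symm
      simp only [dsetTrue, dget?, if_neg h, if_neg hxc]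
  | cons p r ih =>
    obtain ⟨k, b⟩ := p
    by_cases hk : k = x
    · subst hk
      by_cases hc : c = k
      · subst hc; simp [dsetTrue, dget?]
      · have hkc : ¬ k = c := fun hh => hc hh.symm
        simp [dsetTrue, dget?, hc, hkc]
    · by_cases hc : c = k
      · subst hc
        simp [dsetTrue, dget?, if_neg hk, hk]
      · have hkc : ¬ k = c := fun hh => hc hh.symm
        rw [dsetTrue, if_neg hk, dget?, if_neg hkc, ih]
        by_cases hcx : c = x
        · simp [hcx]
        · simp [hcx, dget?, if_neg hkc]

theorem vis_dsetTrue (v : List (Int × Bool)) (x c : Int) :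
    vis (dsetTrue v x) c = if c = x then true else vis v c := by
  rw [vis, dget?_dsetTrue]
  by_cases h : c = x <;> simp [h, vis]

theorem length_filter_mono {p q : Int → Bool} (l : List Int)
    (h : ∀ a ∈ l, p a = true → q a = true) : (l.filter p).length ≤ (l.filter q).length := by
  induction l with
  | nil => simp
  | cons a t ih =>
    have ht := ih (fun x hx => h x (List.mem_cons_of_mem _ hx))
    by_cases hp : p a = true
    · rw [List.filter_cons_of_pos hp, List.filter_cons_of_pos (h a List.mem_cons_self hp)]
      simpa using ht
    · rw [List.filter_cons_of_neg (by simpa using hp)]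
      cases hq : q a
      · rw [List.filter_cons_of_neg (by simp [hq])]; exact ht
      · rw [List.filter_cons_of_pos hq]; simp; omega

theorem nv_dsetTrue_le (graph : List (Int × List Int)) (v : List (Int × Bool)) (x : Int) :
    nv graph (dsetTrue v x) ≤ nv graph v := by
  unfold nv
  refine length_filter_mono _ (fun a _ h => ?_)
  rw [vis_dsetTrue] at h
  by_cases hax : a = x
  · simp [hax] at h
  · simpa [hax] using h

theorem filter_dec_aux (v : List (Int × Bool)) (x : Int) (hv : vis v x = false) :
    ∀ l : List Int, l.Nodup → x ∈ l →
      (l.filter (fun c => !vis (dsetTrue v x) c)).length + 1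
        ≤ (l.filter (fun c => !vis v c)).length := by
  intro l
  induction l with
  | nil => intro _ h; simp at h
  | cons a t ih =>
    intro hnd hx
    have hat : a ∉ t := (List.nodup_cons.mp hnd).1
    have hndt : t.Nodup := (List.nodup_cons.mp hnd).2
    by_cases hax : a = x
    · subst hax
      rw [List.filter_cons_of_neg (by simp [vis_dsetTrue]),
          List.filter_cons_of_pos (by simp [hv])]
      have hmono : ∀ b ∈ t, (!vis (dsetTrue v a) b) = true → (!vis v b) = true := by
        intro b hb h
        rw [vis_dsetTrue] at h
        rcases eq_or_ne b a with rfl | hba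
        · exact absurd hb hat
        · simpa [hba] using h
      have := length_filter_mono t hmono
      simp only [List.length_cons]
      omega
    · have hxt : x ∈ t := by
        rcases List.mem_cons.mp hx with h | h
        · exact absurd h.symm hax
        · exact h
      have hih := ih hndt hxt
      by_cases hva : vis v a = true
      · rw [List.filter_cons_of_neg (by rw [vis_dsetTrue, if_neg hax]; simp [hva]),
            List.filter_cons_of_neg (by simp [hva])]
        exact hih
      · have hva' : vis v a = false := by simpa using hva
        rw [List.filter_cons_of_pos (by rw [vis_dsetTrue, if_neg hax]; simp [hva']),
            List.filter_cons_of_pos (by simp [hva'])]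
        simp only [List.length_cons]
        omega

theorem nv_dsetTrue_lt (graph : List (Int × List Int)) (v : List (Int × Bool)) (x : Int)
    (hx : x ∈ uN graph) (hv : vis v x = false) :
    nv graph (dsetTrue v x) + 1 ≤ nv graph v := by
  unfold nv
  exact filter_dec_aux v x hv (uN graph) (by rw [uN]; exact List.nodup_dedup _) hx

theorem nv_le (graph : List (Int × List Int)) (v : List (Int × Bool)) :
    nv graph v ≤ (graph.flatMap (fun p => p.2)).length := by
  calc nv graph v ≤ (uN graph).length := List.length_filter_le _ _
    _ ≤ _ := by rw [uN]; exact (graph.flatMap (fun p => p.2)).dedup_sublist.length_le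

theorem mem_dgetL (graph : List (Int × List Int)) (n : Int) :
    ∀ c ∈ dgetL graph n, ∃ p, p ∈ graph ∧ c ∈ p.2 := by
  induction graph with
  | nil => intro c hc; simp [dgetL, dget?] at hc
  | cons p g ih =>
    obtain ⟨k, l⟩ := p
    intro c hc
    by_cases hk : k = n
    · simp [dgetL, dget?, hk] at hc
      exact ⟨(k, l), List.mem_cons_self, hc⟩
    · simp only [dgetL, dget?, if_neg hk] at hc
      obtain ⟨q, hq, hcq⟩ := ih c hc
      exact ⟨q, List.mem_cons_of_mem _ hq, hcq⟩

theorem mem_uN_of_dgetL (graph : List (Int × List Int)) (n : Int) (c : Int)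
    (hc : c ∈ dgetL graph n) : c ∈ uN graph := by
  obtain ⟨p, hp, hcp⟩ := mem_dgetL graph n c hc
  rw [uN, List.mem_dedup]
  exact List.mem_flatMap.mpr ⟨p, hp, hcp⟩

-- machine single-step equations
theorem runB_nil (g : List (Int × List Int)) (f : Nat) (ret : Option (Int × Int)) (v : List (Int × Bool)) :
    runB g f [] ret v = (ret, v) := by
  rw [runB.eq_def]

theorem runB_merge (g : List (Int × List Int)) (f : Nat) (rest : List Int) (sm temp : Int)
    (st : List (List Int × Int × Int)) (p : Int × Int) (v : List (Int × Bool)) :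
    runB g f ((rest, sm, temp) :: st) (some p) v
      = runB g f ((rest, if p.1 > sm then p.1 else sm, if p.1 > sm then p.2 else temp) :: st) none v := by
  rw [runB.eq_def]

theorem runB_none (g : List (Int × List Int)) (f : Nat) (rest : List Int) (sm temp : Int)
    (st : List (List Int × Int × Int)) (v : List (Int × Bool)) (h : skipB v rest = []) :
    runB g f ((rest, sm, temp) :: st) none v = runB g f st (some (sm + 1, temp)) v := by
  rw [runB.eq_def]; simp [h]

theorem runB_push (g : List (Int × List Int)) (f : Nat) (rest : List Int) (sm temp : Int)
    (st : List (List Int × Int × Int)) (v : List (Int × Bool)) (c : Int) (r' : List Int)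
    (h : skipB v rest = c :: r') :
    runB g (f + 1) ((rest, sm, temp) :: st) none v
      = runB g f ((dgetL g c, 0, c) :: (r', sm, temp) :: st) none (dsetTrue v c) := by
  rw [runB.eq_def]; simp [h]

theorem runB_skip (g : List (Int × List Int)) (f : Nat) (c : Int) (cs : List Int) (sm temp : Int)
    (st : List (List Int × Int × Int)) (v : List (Int × Bool)) (h : vis v c = true) :
    runB g f ((c :: cs, sm, temp) :: st) none v = runB g f ((cs, sm, temp) :: st) none v := by
  rw [runB.eq_def, runB.eq_def]
  simp [skipB, h]

-- the simulation: running B's machine on a freshly pushed frame for n computes A's recursion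
theorem nodeSim (graph : List (Int × List Int)) :
    ∀ (f : Nat) (n : Int) (v : List (Int × Bool)),
      nv graph (dsetTrue v n) < f →
      ∃ used : Nat,
        used + nv graph (dfsA graph f n v).2 ≤ nv graph (dsetTrue v n) ∧
        ∀ (fB : Nat) (stack : List (List Int × Int × Int)),
          runB graph (used + fB) ((dgetL graph n, 0, n) :: stack) none (dsetTrue v n)
            = runB graph fB stack (some (dfsA graph f n v).1) (dfsA graph f n v).2 := by
  intro f
  induction f using Nat.strong_induction_on with
  | _ f IHf =>
    intro n v Hf
    match f, Hf with
    | Nat.succ f', Hf =>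
      have loopSim : ∀ (rest : List Int) (v : List (Int × Bool)),
          (∀ c ∈ rest, c ∈ uN graph) →
          nv graph v ≤ f' →
          ∀ (sm temp : Int),
          ∃ used : Nat,
            used + nv graph (loopA graph f' rest sm temp v).2.2 ≤ nv graph v ∧
            ∀ (fB : Nat) (stack : List (List Int × Int × Int)),
              runB graph (used + fB) ((rest, sm, temp) :: stack) none v
                = runB graph fB stack
                    (some ((loopA graph f' rest sm temp v).1 + 1, (loopA graph f' rest sm temp v).2.1))
                    (loopA graph f' rest sm temp v).2.2 := by
        intro rest
        induction rest with
        | nil =>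
          intro v hR hff sm temp
          refine ⟨0, by simp [loopA], fun fB stack => ?_⟩
          rw [Nat.zero_add, runB_none graph fB [] sm temp stack v (by simp [skipB])]
          simp [loopA]
        | cons c cs IHcs =>
          intro v hR hff sm temp
          by_cases hv : vis v c = true
          · have hL : loopA graph f' (c :: cs) sm temp v = loopA graph f' cs sm temp v := by
              rw [loopA, if_pos hv]
            obtain ⟨u, hb, he⟩ := IHcs v (fun x hx => hR x (List.mem_cons_of_mem _ hx)) hff sm temp
            exact ⟨u, by rw [hL]; exact hb, fun fB stack => by
              rw [runB_skip graph (u + fB) c cs sm temp stack v hv, hL]; exact he fB stack⟩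
          · have hcU : c ∈ uN graph := hR c List.mem_cons_self
            have hvf : vis v c = false := by simpa using hv
            have hffc : nv graph (dsetTrue v c) + 1 ≤ nv graph v := nv_dsetTrue_lt graph v c hcU hvf
            have hlt : nv graph (dsetTrue v c) < f' := by omega
            obtain ⟨u1, hb1, he1⟩ := IHf f' (Nat.lt_succ_self f') c v hlt
            have hR2 : ∀ x ∈ cs, x ∈ uN graph :=
              fun x hx => hR x (List.mem_cons_of_mem _ hx)
            have hff2 : nv graph (dfsA graph f' c v).2 ≤ f' := by omega
            obtain ⟨u2, hb2, he2⟩ := IHcs (dfsA graph f' c v).2 hR2 hff2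
              (if (dfsA graph f' c v).1.1 > sm then (dfsA graph f' c v).1.1 else sm)
              (if (dfsA graph f' c v).1.1 > sm then (dfsA graph f' c v).1.2 else temp)
            have hL : loopA graph f' (c :: cs) sm temp v
                = loopA graph f' cs (if (dfsA graph f' c v).1.1 > sm then (dfsA graph f' c v).1.1 else sm)
                    (if (dfsA graph f' c v).1.1 > sm then (dfsA graph f' c v).1.2 else temp)
                    (dfsA graph f' c v).2 := by
              rw [loopA, if_neg (by simpa using hv)]
            refine ⟨1 + u1 + u2, by rw [hL]; omega, fun fB stack => ?_⟩
            have hskip : skipB v (c :: cs) = c :: cs := by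
              rw [skipB, if_neg (by simpa using hv)]
            calc runB graph (1 + u1 + u2 + fB) ((c :: cs, sm, temp) :: stack) none v
                = runB graph (u1 + (u2 + fB) + 1) ((c :: cs, sm, temp) :: stack) none v := by
                  congr 1; omega
              _ = runB graph (u1 + (u2 + fB)) ((dgetL graph c, 0, c) :: (cs, sm, temp) :: stack) none (dsetTrue v c) :=
                  runB_push graph (u1 + (u2 + fB)) (c :: cs) sm temp stack v c cs hskip
              _ = runB graph (u2 + fB) ((cs, sm, temp) :: stack) (some (dfsA graph f' c v).1) (dfsA graph f' c v).2 :=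
                  he1 (u2 + fB) ((cs, sm, temp) :: stack)
              _ = runB graph (u2 + fB)
                    ((cs, if (dfsA graph f' c v).1.1 > sm then (dfsA graph f' c v).1.1 else sm,
                          if (dfsA graph f' c v).1.1 > sm then (dfsA graph f' c v).1.2 else temp) :: stack)
                    none (dfsA graph f' c v).2 :=
                  runB_merge graph (u2 + fB) cs sm temp stack (dfsA graph f' c v).1 (dfsA graph f' c v).2
              _ = _ := by rw [hL]; exact he2 fB stack
      have hR1 : ∀ c ∈ dgetL graph n, c ∈ uN graph := mem_uN_of_dgetL graph n
      have hff1 : nv graph (dsetTrue v n) ≤ f' := by omega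
      obtain ⟨u, hb, he⟩ := loopSim (dgetL graph n) (dsetTrue v n) hR1 hff1 0 n
      have hA : dfsA graph (Nat.succ f') n v
          = (((loopA graph f' (dgetL graph n) 0 n (dsetTrue v n)).1 + 1,
              (loopA graph f' (dgetL graph n) 0 n (dsetTrue v n)).2.1),
             (loopA graph f' (dgetL graph n) 0 n (dsetTrue v n)).2.2) := by
        rw [dfsA]
      exact ⟨u, by rw [hA]; exact hb, fun fB stack => by rw [hA]; exact he fB stack⟩

-- ===== VERDICT (by name: the statement is the Claim_ definition above) =====
theorem dfs1_spec : Claim_equal_dfs1 := by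
  intro graph node visited hdom hpre
  unfold Spec_dfs1
  have hnv : nv graph (dsetTrue visited node) ≤ (graph.flatMap (fun p => p.2)).length :=
    le_trans (nv_dsetTrue_le graph visited node) (nv_le graph visited)
  have Hf : nv graph (dsetTrue visited node) < (graph.flatMap (fun p => p.2)).length + 1 := by omega
  obtain ⟨u, hb, he⟩ := nodeSim graph ((graph.flatMap (fun p => p.2)).length + 1) node visited Hf
  have hu : u ≤ (graph.flatMap (fun p => p.2)).length := by omega
  have heq := he ((graph.flatMap (fun p => p.2)).length + 1 - u) []
  rw [show u + ((graph.flatMap (fun p => p.2)).length + 1 - u)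
        = (graph.flatMap (fun p => p.2)).length + 1 from by omega, runB_nil] at heq
  unfold dfs1 dfs1_alt
  rw [heq]
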